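-- pv_equiv track=rewrite | github.com/ss0900/P6ix-groupware | backend/operation/services/quote_service.py | _convert_chunk_to_korean
-- ===== SOURCE A (Python) =====
-- def _convert_chunk_to_korean(chunk: int, digits: list, sub_units: list) -> str:
--     """4자리 청크를 한글로 변환"""
--     result = []
--     sub_unit_idx = 0
--
--     while chunk > 0:
--         digit = chunk % 10
--         chunk //= 10
--
--         if digit > 0:
--             # 일의 자리가 아닌 경우 '일'은 생략 (예: 십, 백, 천)
--             if digit == 1 and sub_unit_idx > 0:
--                 result.append(sub_units[sub_unit_idx])
--             else:
--                 result.append(digits[digit] + sub_units[sub_unit_idx])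
--
--         sub_unit_idx += 1
--
--     return ''.join(reversed(result))
-- ===== SOURCE B (Python) =====
-- def _convert_chunk_to_korean(chunk: int, digits: list, sub_units: list) -> str:
--     """4-digit chunk to Korean, MSB-first over str(chunk) in one comprehension."""
--     if chunk <= 0:
--         return ''
--     s = str(chunk)
--     last = len(s) - 1
--     return ''.join(
--         sub_units[last - i] if ch == '1' and i < last else digits[int(ch)] + sub_units[last - i]
--         for i, ch in enumerate(s) if ch != '0'
--     )
-- ===== Notes on version B (the rewrite author's own statement) =====
-- stated objective: idiomatic
-- what changed: Replaces the LSB-first while-loop (modulo/floor-divide digit extraction into a list that is finally reversed and joined) by a single guarded join over one MSB-first comprehension on str(chunk), computing each unit position from the string index so no reversal or accumulator is needed.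
import Mathlib
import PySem

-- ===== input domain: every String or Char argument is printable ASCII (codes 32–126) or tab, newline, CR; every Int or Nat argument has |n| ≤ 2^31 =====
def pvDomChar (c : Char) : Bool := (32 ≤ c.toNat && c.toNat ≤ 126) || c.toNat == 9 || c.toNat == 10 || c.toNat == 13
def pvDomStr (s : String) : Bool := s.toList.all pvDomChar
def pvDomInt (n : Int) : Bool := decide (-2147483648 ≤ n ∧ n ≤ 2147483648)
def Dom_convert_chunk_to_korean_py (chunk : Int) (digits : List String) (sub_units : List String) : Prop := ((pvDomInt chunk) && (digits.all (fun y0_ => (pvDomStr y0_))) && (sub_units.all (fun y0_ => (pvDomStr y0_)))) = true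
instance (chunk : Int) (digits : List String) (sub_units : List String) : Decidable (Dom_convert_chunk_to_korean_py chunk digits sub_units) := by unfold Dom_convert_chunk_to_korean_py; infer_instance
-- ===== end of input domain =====

-- B replaces A's LSB-first while-loop (mod/div extraction, list accumulator, final reversal)
-- by one MSB-first comprehension over str(chunk) joined directly; same cost, more idiomatic.

-- ===== PORT A =====
lemma pvFloordiv10_toNat_lt (c : Int) (h : 0 < c) : (PySem.Int.floordiv c 10).toNat < c.toNat := by
  rw [PySem.Int.floordiv_eq_ediv_of_pos (by norm_num)]
  omega

-- the while-loop of A: state = (chunk, sub_unit_idx, result)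
def aLoop (chunk : Int) (digits : List String) (sub_units : List String)
    (sub_unit_idx : Nat) (result : List String) : List String :=
  if h : 0 < chunk then
    aLoop (PySem.Int.floordiv chunk 10) digits sub_units (sub_unit_idx + 1)
      (if 0 < PySem.Int.mod chunk 10 then
         if PySem.Int.mod chunk 10 = 1 ∧ 0 < sub_unit_idx then
           result ++ [PySem.List.pyGetD sub_units (sub_unit_idx : Int) ""]
         else
           result ++ [PySem.List.pyGetD digits (PySem.Int.mod chunk 10) "" ++
                      PySem.List.pyGetD sub_units (sub_unit_idx : Int) ""]
       else result)
  else result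
termination_by chunk.toNat
decreasing_by exact pvFloordiv10_toNat_lt chunk h

def convert_chunk_to_korean_py (chunk : Int) (digits : List String) (sub_units : List String) : String :=
  PySem.Str.join "" (aLoop chunk digits sub_units 0 []).reverse

-- ===== PORT B =====
-- int(ch) on a digit character of str(chunk) is ported exactly as ch.toNat - 48
def convert_chunk_to_korean_py_alt (chunk : Int) (digits : List String) (sub_units : List String) : String :=
  if chunk ≤ 0 then "" else
    let s := (PySem.Int.toStr chunk).toList
    let last : Int := PySem.List.len s - 1
    PySem.Str.join ""
      (((PySem.List.enumerate s).filter (fun p => p.2 ≠ '0')).map (fun p =>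
        if p.2 = '1' ∧ p.1 < last then PySem.List.pyGetD sub_units (last - p.1) ""
        else PySem.List.pyGetD digits ((p.2.toNat : Int) - 48) "" ++
             PySem.List.pyGetD sub_units (last - p.1) ""))

-- ===== PRECONDITION & SPEC =====
-- Pre_ excludes exactly the inputs where A raises IndexError: some nonzero decimal digit d of
-- chunk at position p has p ≥ len(sub_units), or needs digits[d] (d ≠ 1 or p = 0) with d ≥ len(digits).
def Pre_convert_chunk_to_korean_py (chunk : Int) (digits : List String) (sub_units : List String) : Prop :=
  ∀ p ∈ (Nat.digits 10 chunk.toNat).zipIdx, p.1 ≠ 0 →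
    p.2 < sub_units.length ∧ (p.1 = 1 ∧ 0 < p.2 ∨ p.1 < digits.length)
instance (chunk : Int) (digits : List String) (sub_units : List String) : Decidable (Pre_convert_chunk_to_korean_py chunk digits sub_units) := by unfold Pre_convert_chunk_to_korean_py; infer_instance

def pvWitness_convert_chunk_to_korean_py : Int × List String × List String :=
  (1203, (["", "one", "two", "three"], ["", "ten", "hund", "thou"]))

def Spec_convert_chunk_to_korean_py (chunk : Int) (digits : List String) (sub_units : List String) (out : String) : Prop := out = convert_chunk_to_korean_py_alt chunk digits sub_units
instance (chunk : Int) (digits : List String) (sub_units : List String) (out : String) : Decidable (Spec_convert_chunk_to_korean_py chunk digits sub_units out) := by unfold Spec_convert_chunk_to_korean_py; infer_instance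

-- ===== CLAIM (what is proved, stated in full; the proofs are below) =====
def Claim_equal_convert_chunk_to_korean_py : Prop := ∀ (chunk : Int) (digits : List String) (sub_units : List String), Dom_convert_chunk_to_korean_py chunk digits sub_units → Pre_convert_chunk_to_korean_py chunk digits sub_units → Spec_convert_chunk_to_korean_py chunk digits sub_units (convert_chunk_to_korean_py chunk digits sub_units)

-- ===== LEMMAS AND PROOFS =====

theorem pvWitness_ok :
    Dom_convert_chunk_to_korean_py pvWitness_convert_chunk_to_korean_py.1
      pvWitness_convert_chunk_to_korean_py.2.1 pvWitness_convert_chunk_to_korean_py.2.2 ∧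
    Pre_convert_chunk_to_korean_py pvWitness_convert_chunk_to_korean_py.1
      pvWitness_convert_chunk_to_korean_py.2.1 pvWitness_convert_chunk_to_korean_py.2.2 := by
  decide

-- the string emitted for decimal digit d at unit position p (shared characterisation)
def pieceAt (digits sub_units : List String) (d p : Nat) : List String :=
  if 0 < d then
    if d = 1 ∧ 0 < p then [sub_units.getD p ""]
    else [digits.getD d "" ++ sub_units.getD p ""]
  else []

def pieces (digits sub_units : List String) : List Nat → Nat → List String
  | [], _ => []
  | d :: t, idx => pieceAt digits sub_units d idx ++ pieces digits sub_units t (idx + 1)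

lemma aLoop_pieces (digits sub_units : List String) :
    ∀ (n : Nat) (idx : Nat) (res : List String),
      aLoop (n : Int) digits sub_units idx res
        = res ++ pieces digits sub_units (Nat.digits 10 n) idx := by
  intro n
  induction n using Nat.strong_induction_on with
  | _ n ih =>
    intro idx res
    by_cases hn : n = 0
    · subst hn
      rw [aLoop]
      simp [pieces]
    · have hpos : 0 < n := Nat.pos_of_ne_zero hn
      have hposI : 0 < (n : Int) := by exact_mod_cast hpos
      have hmod : PySem.Int.mod (n : Int) 10 = ((n % 10 : Nat) : Int) := by
        exact_mod_cast PySem.Int.mod_natCast n 10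
      have hdiv : PySem.Int.floordiv (n : Int) 10 = ((n / 10 : Nat) : Int) := by
        exact_mod_cast PySem.Int.floordiv_natCast n 10
      rw [aLoop, dif_pos hposI, hmod, hdiv,
          ih (n / 10) (Nat.div_lt_self hpos (by norm_num)) (idx + 1),
          Nat.digits_def' (by norm_num : 1 < 10) hpos]
      have hgd : PySem.List.pyGetD digits ((n % 10 : Nat) : Int) "" = digits.getD (n % 10) "" :=
        PySem.List.pyGetD_natCast digits (n % 10) ""
      have hgs : PySem.List.pyGetD sub_units (idx : Int) "" = sub_units.getD idx "" :=
        PySem.List.pyGetD_natCast sub_units idx ""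
      have hc0 : (0 < ((n % 10 : Nat) : Int)) ↔ 0 < n % 10 := by exact_mod_cast Iff.rfl
      have hc1 : (((n % 10 : Nat) : Int) = 1) ↔ n % 10 = 1 := by exact_mod_cast Iff.rfl
      simp only [pieces, pieceAt, hgd, hgs, hc0, hc1]
      split_ifs <;> simp [List.append_assoc]

lemma pieceAt_reverse (digits sub_units : List String) (d p : Nat) :
    (pieceAt digits sub_units d p).reverse = pieceAt digits sub_units d p := by
  unfold pieceAt; split_ifs <;> rfl

lemma pieces_flatMap (digits sub_units : List String) :
    ∀ (ds : List Nat) (idx : Nat),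
      pieces digits sub_units ds idx
        = (List.range ds.length).flatMap (fun k => pieceAt digits sub_units (ds.getD k 0) (idx + k)) := by
  intro ds
  induction ds with
  | nil => intro idx; simp [pieces]
  | cons d t ih =>
    intro idx
    have hfun : (fun k => pieceAt digits sub_units (t.getD k 0) ((idx + 1) + k))
        = (fun k => pieceAt digits sub_units ((d :: t).getD (k + 1) 0) (idx + (k + 1))) := by
      funext k
      rw [List.getD_cons_succ]
      congr 1
      omega
    simp only [pieces, ih (idx + 1), List.length_cons, List.range_succ_eq_map,
      List.flatMap_cons, List.flatMap_map, List.getD_cons_zero, Nat.add_zero, hfun]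

-- A's joined-and-reversed accumulator, as a MSB-first flatMap over positions
lemma aLoop_char (digits sub_units : List String) (ds : List Nat) :
    (pieces digits sub_units ds 0).reverse
      = (List.range ds.length).reverse.flatMap (fun k => pieceAt digits sub_units (ds.getD k 0) k) := by
  rw [pieces_flatMap, List.reverse_flatMap]
  simp only [Function.comp_def, pieceAt_reverse, Nat.zero_add]

-- str(n) for n > 0 is the base-10 digit list, MSB first
lemma toDigitsCore_digits :
    ∀ (f n : Nat), 0 < n → n < 10 ^ f → ∀ (acc : List Char),
      Nat.toDigitsCore 10 f n acc = ((Nat.digits 10 n).map Nat.digitChar).reverse ++ acc := by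
  intro f
  induction f with
  | zero => intro n hn hf; omega
  | succ f ih =>
    intro n hn hf acc
    rw [Nat.toDigitsCore]
    by_cases h : n / 10 = 0
    · rw [if_pos h, Nat.digits_def' (by norm_num : 1 < 10) hn, h]
      simp
    · rw [if_neg h, ih (n / 10) (Nat.pos_of_ne_zero h) (by
        have : n < 10 * 10 ^ f := by rw [← pow_succ']; exact hf
        omega),
        Nat.digits_def' (by norm_num : 1 < 10) hn]
      simp

lemma toChars_pos (n : Nat) (hn : 0 < n) :
    PySem.Int.toChars (n : Int) = ((Nat.digits 10 n).map Nat.digitChar).reverse := by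
  unfold PySem.Int.toChars
  rw [if_neg (by omega)]
  have : ((n : Int)).toNat = n := Int.toNat_natCast n
  rw [this]
  unfold Nat.toDigits
  rw [toDigitsCore_digits (n + 1) n hn
    (lt_of_lt_of_le (Nat.lt_pow_self (by norm_num)) (Nat.pow_le_pow_right (by norm_num) (Nat.le_succ n)))]
  simp

lemma map_filter_eq_flatMap {α β : Type} (l : List α) (q : α → Bool) (f : α → β) :
    (l.filter q).map f = l.flatMap (fun x => if q x then [f x] else []) := by
  induction l with
  | nil => rfl
  | cons a t ih => by_cases h : q a <;> simp [h, ih]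

lemma enumerate_flatMap {β : Type} (g : Int × Char → List β) :
    ∀ (cs : List Char) (j : Int),
      (PySem.List.enumerate cs j).flatMap g
        = (List.range cs.length).flatMap (fun i => g (j + Int.ofNat i, cs.getD i ' ')) := by
  intro cs
  induction cs with
  | nil => intro j; simp [PySem.List.enumerate_nil]
  | cons c t ih =>
    intro j
    have hfun : (fun i => g ((j + 1) + Int.ofNat i, t.getD i ' '))
        = (fun i => g (j + Int.ofNat (i + 1), (c :: t).getD (i + 1) ' ')) := by
      funext i
      rw [List.getD_cons_succ]
      congr 2
      simp [Int.ofNat_eq_natCast]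
      ring
    simp only [PySem.List.enumerate_cons, List.flatMap_cons, ih (j + 1), List.length_cons,
      List.range_succ_eq_map, List.flatMap_map, List.getD_cons_zero, hfun]
    congr 1
    simp [Int.ofNat_eq_natCast]

lemma digitChar_ne_zero {d : Nat} (h : d < 10) : (Nat.digitChar d ≠ '0') ↔ 0 < d := by
  interval_cases d <;> simp [Nat.digitChar]

lemma digitChar_eq_one {d : Nat} (h : d < 10) : (Nat.digitChar d = '1') ↔ d = 1 := by
  interval_cases d <;> simp [Nat.digitChar]

lemma digitChar_toNat {d : Nat} (h : d < 10) : ((Nat.digitChar d).toNat : Int) - 48 = (d : Int) := by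
  interval_cases d <;> simp [Nat.digitChar]

-- ===== VERDICT (by name: the statement is the Claim_ definition above) =====
theorem convert_chunk_to_korean_py_spec : Claim_equal_convert_chunk_to_korean_py := by
  intro chunk digits sub_units _dom _pre
  unfold Spec_convert_chunk_to_korean_py
  by_cases hc : chunk ≤ 0
  · have h0 : chunk.toNat = 0 := by omega
    unfold convert_chunk_to_korean_py convert_chunk_to_korean_py_alt
    rw [aLoop, dif_neg (by omega), if_pos hc]
    rfl
  · push Not at hc
    have hn : 0 < chunk.toNat := by omega
    set n := chunk.toNat with hdefn
    have hcast : ((n : Int)) = chunk := by omega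
    set ds := Nat.digits 10 n with hds
    have hlt : ∀ d ∈ ds, d < 10 := fun d hd => Nat.digits_lt_base (by norm_num) hd
    have hdne : ds ≠ [] := by
      rw [hds]; exact Nat.digits_ne_nil_iff_ne_zero.mpr (by omega)
    set m := ds.length with hm
    have hm1 : 1 ≤ m := List.length_pos_iff.mpr hdne
    -- A side
    unfold convert_chunk_to_korean_py
    rw [← hcast, aLoop_pieces digits sub_units n 0 [], List.nil_append, ← hds,
      aLoop_char digits sub_units ds]
    -- B side
    unfold convert_chunk_to_korean_py_alt
    rw [if_neg (by omega)]
    have hs : (PySem.Int.toStr (n : Int)).toList = (ds.map Nat.digitChar).reverse := by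
      rw [PySem.Int.toList_toStr, toChars_pos n hn, hds]
    simp only [hs]
    have hlen : ((ds.map Nat.digitChar).reverse).length = m := by simp [hm]
    have hlenI : PySem.List.len ((ds.map Nat.digitChar).reverse) = (m : Int) := by
      simp [PySem.List.len_eq, hlen]
    rw [map_filter_eq_flatMap, enumerate_flatMap, hlen]
    -- both sides are flatMaps over List.range m; identify them pointwise
    congr 1
    rw [List.range_eq_range', List.reverse_range', ← List.range_eq_range', List.flatMap_map,
      List.flatMap_def, List.flatMap_def]
    congr 1
    apply List.map_congr_left
    intro i hi
    have him : i < m := List.mem_range.mp hi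
    have hget : ((ds.map Nat.digitChar).reverse).getD i ' ' = Nat.digitChar (ds.getD (m - 1 - i) 0) := by
      have h1 : i < ((ds.map Nat.digitChar).reverse).length := by rw [hlen]; exact him
      rw [List.getD_eq_getElem _ _ h1, List.getElem_reverse]
      have h2 : ds.length - 1 - i < ds.length := by omega
      rw [List.getElem_map]
      rw [List.getD_eq_getElem _ _ (by omega : m - 1 - i < ds.length)]
      congr 1
      simp [hm]
    set d := ds.getD (m - 1 - i) 0 with hd
    have hdlt : d < 10 := hlt _ (by
      rw [hd]
      rw [List.getD_eq_getElem _ _ (by omega : m - 1 - i < ds.length)]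
      exact List.getElem_mem _)
    have hposI : PySem.List.len ((ds.map Nat.digitChar).reverse) - 1 - (i : Int)
        = ((m - 1 - i : Nat) : Int) := by
      rw [hlenI]; omega
    simp only [hget, hlenI, zero_add]
    simp only [Int.ofNat_eq_natCast, ← hm]
    by_cases hz : 0 < d
    · rw [if_pos (by simpa [digitChar_ne_zero hdlt] using hz)]
      unfold pieceAt
      rw [if_pos hz]
      have hcond : (Nat.digitChar d = '1' ∧ (i : Int) < (m : Int) - 1) ↔ (d = 1 ∧ 0 < m - 1 - i) := by
        rw [digitChar_eq_one hdlt]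
        constructor
        · rintro ⟨h1, h2⟩; exact ⟨h1, by omega⟩
        · rintro ⟨h1, h2⟩; exact ⟨h1, by omega⟩
      have hsub : PySem.List.pyGetD sub_units ((m : Int) - 1 - (i : Int)) ""
          = sub_units.getD (m - 1 - i) "" := by
        rw [(by omega : (m : Int) - 1 - (i : Int) = ((m - 1 - i : Nat) : Int))]
        simp [PySem.List.pyGetD_natCast]
      have hdig : PySem.List.pyGetD digits (((Nat.digitChar d).toNat : Int) - 48) ""
          = digits.getD d "" := by
        rw [digitChar_toNat hdlt]
        simp [PySem.List.pyGetD_natCast]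
      by_cases h1 : d = 1 ∧ 0 < m - 1 - i
      · rw [if_pos (hcond.mpr h1), if_pos h1, hsub]
      · rw [if_neg (fun hx => h1 (hcond.mp hx)), if_neg h1, hsub, hdig]
    · rw [if_neg (by simpa [digitChar_ne_zero hdlt] using hz)]
      unfold pieceAt
      rw [if_neg hz]
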